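-- pv_equiv track=rewrite | github.com/ursiee-ase1/survwatch_pipeline | cctv/detectors/model.py | _determine_alert_type
-- ===== SOURCE A (Python) =====
-- def _determine_alert_type(detections):
--     """
--     Determine the primary alert type from multiple detections.
--
--     Args:
--         detections: List of detection dictionaries
--
--     Returns:
--         str: Primary alert type
--     """
--     if not detections:
--         return None
--
--     # Count detections by type
--     person_count = sum(1 for d in detections if d['class'].lower() == 'person')
--     vehicle_count = sum(1 for d in detections
--                        if d['class'].lower() in ['car', 'truck', 'bus', 'motorcycle'])
--
--     # Prioritize person detection
--     if person_count > 0: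
--         return 'intrusion'
--     elif vehicle_count > 0:
--         return 'intrusion'
--     else:
--         return 'suspicious'
-- ===== SOURCE B (Python) =====
-- _ALERT_CLASSES = {'person', 'car', 'truck', 'bus', 'motorcycle'}
--
--
-- def _determine_alert_type(detections):
--     if not detections:
--         return None
--     if any(d['class'].lower() in _ALERT_CLASSES for d in detections):
--         return 'intrusion'
--     return 'suspicious'
-- ===== Notes on version B (the rewrite author's own statement) =====
-- stated objective: simpler
-- what changed: Both of A's branches return 'intrusion', so B replaces A's two full counting scans and count-based branching with a single short-circuiting any() over the union set {'person','car','truck','bus','motorcycle'}.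
import Mathlib
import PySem

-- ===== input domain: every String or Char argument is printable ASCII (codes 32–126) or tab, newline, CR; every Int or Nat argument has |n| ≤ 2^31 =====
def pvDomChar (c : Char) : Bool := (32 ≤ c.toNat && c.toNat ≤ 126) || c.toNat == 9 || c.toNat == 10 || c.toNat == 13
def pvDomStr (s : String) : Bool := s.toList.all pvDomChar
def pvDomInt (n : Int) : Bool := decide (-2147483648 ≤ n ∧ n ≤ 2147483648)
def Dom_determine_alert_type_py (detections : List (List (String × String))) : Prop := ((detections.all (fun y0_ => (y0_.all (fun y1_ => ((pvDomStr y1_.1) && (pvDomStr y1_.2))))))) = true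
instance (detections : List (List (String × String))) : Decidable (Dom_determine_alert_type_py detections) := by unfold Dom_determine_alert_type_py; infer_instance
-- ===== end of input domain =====

-- B replaces A's two counting scans with one short-circuiting any() over the union alert set (simpler).
-- Pre_ excludes inputs where some detection dict lacks the key 'class' (Python A raises KeyError there).


-- ===== PORT A =====
-- d['class'].lower(); the .getD "" fallback is reached only outside Pre_ (Python raises KeyError there)
def pvClsA (d : List (String × String)) : String :=
  PySem.Str.lower (((PySem.Dict.mk d).get? "class").getD "")

def determine_alert_type_py (detections : List (List (String × String))) : Option String :=
  if detections.isEmpty then none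
  else
    let person_count : Int :=
      (detections.map (fun d => if pvClsA d = "person" then (1 : Int) else 0)).sum
    let vehicle_count : Int :=
      (detections.map (fun d => if pvClsA d ∈ ["car", "truck", "bus", "motorcycle"] then (1 : Int) else 0)).sum
    if person_count > 0 then some "intrusion"
    else if vehicle_count > 0 then some "intrusion"
    else some "suspicious"

-- ===== PORT B =====
def pvAlertClasses : PySem.Set String := PySem.Set.ofList ["person", "car", "truck", "bus", "motorcycle"]

def pvClsB (d : List (String × String)) : String :=
  PySem.Str.lower (((PySem.Dict.mk d).get? "class").getD "")

def determine_alert_type_py_alt (detections : List (List (String × String))) : Option String :=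
  match detections with
  | [] => none
  | _ =>
    if detections.any (fun d => pvAlertClasses.contains (pvClsB d)) then some "intrusion"
    else some "suspicious"

-- ===== PRECONDITION & SPEC =====
-- Pre_ excludes detections missing the key 'class': Python A raises KeyError there.
def Pre_determine_alert_type_py (detections : List (List (String × String))) : Prop :=
  ∀ d ∈ detections, "class" ∈ d.map Prod.fst
instance (detections : List (List (String × String))) : Decidable (Pre_determine_alert_type_py detections) := by unfold Pre_determine_alert_type_py; infer_instance

def pvWitness_determine_alert_type_py : (List (List (String × String))) := [[("class", "Person")]]

def Spec_determine_alert_type_py (detections : List (List (String × String))) (out : Option String) : Prop := out = determine_alert_type_py_alt detections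
instance (detections : List (List (String × String))) (out : Option String) : Decidable (Spec_determine_alert_type_py detections out) := by unfold Spec_determine_alert_type_py; infer_instance

-- ===== CLAIM (what is proved, stated in full; the proofs are below) =====
def Claim_equal_determine_alert_type_py : Prop := ∀ (detections : List (List (String × String))), Dom_determine_alert_type_py detections → Pre_determine_alert_type_py detections → Spec_determine_alert_type_py detections (determine_alert_type_py detections)

-- ===== LEMMAS AND PROOFS =====

lemma sum_ind_pos (l : List (List (String × String))) (p : List (String × String) → Prop)
    [DecidablePred p] :
    0 < (l.map (fun d => if p d then (1 : Int) else 0)).sum ↔ ∃ d ∈ l, p d := by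
  induction l with
  | nil => simp
  | cons a t ih =>
    have hnn : 0 ≤ (t.map (fun d => if p d then (1 : Int) else 0)).sum := by
      apply List.sum_nonneg; intro x hx
      simp only [List.mem_map] at hx
      obtain ⟨d, _, rfl⟩ := hx
      split <;> omega
    simp only [List.map_cons, List.sum_cons]
    by_cases h : p a
    · rw [if_pos h]
      constructor
      · intro _; exact ⟨a, List.mem_cons_self .., h⟩
      · intro _; omega
    · rw [if_neg h, zero_add, ih]
      constructor
      · rintro ⟨d, hd, hpd⟩; exact ⟨d, List.mem_cons_of_mem _ hd, hpd⟩
      · rintro ⟨d, hd, hpd⟩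
        rcases List.mem_cons.1 hd with rfl | hd'
        · exact absurd hpd h
        · exact ⟨d, hd', hpd⟩

lemma cls_mem_iff (d : List (String × String)) :
    pvAlertClasses.contains (pvClsB d) = true ↔
      (pvClsA d = "person" ∨ pvClsA d ∈ ["car", "truck", "bus", "motorcycle"]) := by
  have hAB : pvClsB d = pvClsA d := rfl
  simp [pvAlertClasses, PySem.Set.contains, PySem.Set.mem_ofList, hAB, List.mem_cons]

-- ===== VERDICT (by name: the statement is the Claim_ definition above) =====
theorem determine_alert_type_py_spec : Claim_equal_determine_alert_type_py := by
  intro det _ _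
  unfold Spec_determine_alert_type_py determine_alert_type_py determine_alert_type_py_alt
  cases det with
  | nil => rfl
  | cons a t =>
    simp only [List.isEmpty_cons, if_neg (by simp : ¬(false = true))]
    set l := a :: t with hl
    by_cases hany : l.any (fun d => pvAlertClasses.contains (pvClsB d)) = true
    · rw [List.any_eq_true] at hany
      obtain ⟨d, hd, hpd⟩ := hany
      rw [cls_mem_iff] at hpd
      have hAny : (l.any (fun d => pvAlertClasses.contains (pvClsB d))) = true := by
        rw [List.any_eq_true]
        exact ⟨d, hd, by rw [cls_mem_iff]; exact hpd⟩
      rw [if_pos hAny]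
      rcases hpd with hp | hv
      · rw [if_pos ((sum_ind_pos l _).2 ⟨d, hd, hp⟩)]
      · by_cases hpc : 0 < (l.map (fun d => if pvClsA d = "person" then (1 : Int) else 0)).sum
        · rw [if_pos hpc]
        · rw [if_neg hpc, if_pos ((sum_ind_pos l _).2 ⟨d, hd, hv⟩)]
    · rw [if_neg hany]
      have hnp : ¬ 0 < (l.map (fun d => if pvClsA d = "person" then (1 : Int) else 0)).sum := by
        rw [sum_ind_pos]
        rintro ⟨d, hd, hp⟩
        exact hany (List.any_eq_true.2 ⟨d, hd, (cls_mem_iff d).2 (Or.inl hp)⟩)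
      have hnv : ¬ 0 < (l.map (fun d => if pvClsA d ∈ ["car", "truck", "bus", "motorcycle"] then (1 : Int) else 0)).sum := by
        rw [sum_ind_pos]
        rintro ⟨d, hd, hv⟩
        exact hany (List.any_eq_true.2 ⟨d, hd, (cls_mem_iff d).2 (Or.inr hv)⟩)
      rw [if_neg hnp, if_neg hnv]
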